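-- pv_equiv track=rewrite | github.com/xXThiago34Xx/SupervisorPV | scripts/personalPresente.py | obtener_personal_presente
-- ===== SOURCE A (Python) =====
-- def obtener_personal_presente(personal, dia_semana, hora_actual):
--     personal_presente_por_cargo = {}
--
--     for persona in personal:
--         apellidos = persona[0]
--         nombres = persona[1]
--         cargo = persona[2]
--
--         # Índices en el archivo donde empiezan las horas para cada día (3 en adelante)
--         idx_entrada = 3 + (dia_semana - 1) * 2
--         idx_salida = idx_entrada + 1
--
--         entrada = persona[idx_entrada]
--         salida = persona[idx_salida]
--
--         # Ignorar si es "DESCANSO" o si no tienen un horario válido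
--         if entrada == "DESCANSO" or salida == "DESCANSO":
--             continue
--
--         # Comparamos la hora actual con el rango de entrada y salida
--         if entrada <= hora_actual <= salida:
--             if cargo not in personal_presente_por_cargo:
--                 personal_presente_por_cargo[cargo] = []
--             personal_presente_por_cargo[cargo].append({
--                 "nombre_completo": f"{apellidos} {nombres}",
--                 "entrada": entrada,
--                 "salida": salida
--             })
--
--     # Ordenar por hora de salida (de menor a mayor)
--     for cargo in personal_presente_por_cargo:
--         personal_presente_por_cargo[cargo].sort(key=lambda x: x['salida'])
--
--     return personal_presente_por_cargo
-- ===== SOURCE B (Python) =====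
-- def obtener_personal_presente(personal, dia_semana, hora_actual):
--     idx_entrada = 3 + (dia_semana - 1) * 2
--
--     def presente(persona):
--         entrada = persona[idx_entrada]
--         salida = persona[idx_entrada + 1]
--         if entrada == "DESCANSO" or salida == "DESCANSO":
--             return None
--         if entrada <= hora_actual <= salida:
--             return (persona[2], {
--                 "nombre_completo": f"{persona[0]} {persona[1]}",
--                 "entrada": entrada,
--                 "salida": salida,
--             })
--         return None
--
--     presentes = [p for p in map(presente, personal) if p is not None]
--     cargos = list(dict.fromkeys(c for c, _ in presentes))
--     ordenados = sorted(presentes, key=lambda p: p[1]["salida"])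
--     return {c: [ficha for c2, ficha in ordenados if c2 == c] for c in cargos}
-- ===== Notes on version B (the rewrite author's own statement) =====
-- stated objective: alternative
-- what changed: A appends entries into per-role lists and then sorts each group separately; B builds one flat list of present (role, entry) pairs, performs a single global stable sort by salida, and groups the sorted list by role in one comprehension over the distinct roles.
import Mathlib
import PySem

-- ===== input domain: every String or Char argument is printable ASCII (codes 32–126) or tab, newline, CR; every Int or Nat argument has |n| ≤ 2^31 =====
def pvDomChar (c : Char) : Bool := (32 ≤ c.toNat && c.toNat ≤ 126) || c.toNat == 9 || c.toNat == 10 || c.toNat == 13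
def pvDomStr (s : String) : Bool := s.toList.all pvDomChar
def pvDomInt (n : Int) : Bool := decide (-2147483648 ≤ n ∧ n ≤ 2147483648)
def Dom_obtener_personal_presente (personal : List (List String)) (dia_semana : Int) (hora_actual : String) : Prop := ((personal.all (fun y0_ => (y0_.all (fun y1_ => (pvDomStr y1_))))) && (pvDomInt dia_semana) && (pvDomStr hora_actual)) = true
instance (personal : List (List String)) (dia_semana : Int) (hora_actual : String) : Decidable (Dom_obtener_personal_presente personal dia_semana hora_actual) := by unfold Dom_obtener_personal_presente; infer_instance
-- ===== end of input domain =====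

-- B replaces A's append-then-sort-each-group by one flat filtered list, a single global
-- stable sort by salida, and one grouping pass over the distinct roles (objective: alternative).

-- ===== PORT A =====
-- shared key helper: the Python `lambda x: x['salida']` appearing in both sources
def pvSalida (x : List (String × String)) : String := (PySem.Dict.mk x).getD "salida" ""

-- the body of A's `for persona in personal` loop, fold state = the dict
def pvBodyA (dia_semana : Int) (hora_actual : String)
    (d : PySem.Dict String (List (List (String × String)))) (persona : List String) :
    PySem.Dict String (List (List (String × String))) :=
  let apellidos := PySem.List.pyGetD persona 0 ""
  let nombres := PySem.List.pyGetD persona 1 ""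
  let cargo := PySem.List.pyGetD persona 2 ""
  let idx_entrada : Int := 3 + (dia_semana - 1) * 2
  let idx_salida : Int := idx_entrada + 1
  let entrada := PySem.List.pyGetD persona idx_entrada ""
  let salida := PySem.List.pyGetD persona idx_salida ""
  if entrada == "DESCANSO" || salida == "DESCANSO" then d
  else if entrada ≤ hora_actual ∧ hora_actual ≤ salida then
    let d1 := if d.contains cargo then d else d.insert cargo []
    d1.insert cargo (d1.getD cargo [] ++
      [[("nombre_completo", apellidos ++ " " ++ nombres), ("entrada", entrada), ("salida", salida)]])
  else d

def obtener_personal_presente (personal : List (List String)) (dia_semana : Int) (hora_actual : String) : List (String × List (List (String × String))) :=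
  let d := personal.foldl (pvBodyA dia_semana hora_actual) PySem.Dict.empty
  d.items.map (fun p => (p.1, PySem.List.sorted p.2 pvSalida false))

-- ===== PORT B =====
-- Source B's `presente(persona)`: Some (cargo, ficha) iff the persona is present now
def pvPresente (dia_semana : Int) (hora_actual : String) (persona : List String) :
    Option (String × List (String × String)) :=
  let idx_entrada : Int := 3 + (dia_semana - 1) * 2
  let entrada := PySem.List.pyGetD persona idx_entrada ""
  let salida := PySem.List.pyGetD persona (idx_entrada + 1) ""
  if entrada == "DESCANSO" || salida == "DESCANSO" then none
  else if entrada ≤ hora_actual ∧ hora_actual ≤ salida then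
    some (PySem.List.pyGetD persona 2 "",
      [("nombre_completo", PySem.List.pyGetD persona 0 "" ++ " " ++ PySem.List.pyGetD persona 1 ""),
       ("entrada", entrada), ("salida", salida)])
  else none

def obtener_personal_presente_alt (personal : List (List String)) (dia_semana : Int) (hora_actual : String) : List (String × List (List (String × String))) :=
  let presentes := personal.filterMap (pvPresente dia_semana hora_actual)
  let cargos := PySem.List.dedup (presentes.map (·.1))
  let ordenados := PySem.List.sorted presentes (fun p => pvSalida p.2) false
  cargos.map (fun c => (c, (ordenados.filter (fun p => p.1 == c)).map (·.2)))

-- ===== PRECONDITION & SPEC =====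
-- Pre_ excludes exactly the inputs where Python A raises IndexError: a persona row shorter
-- than 3 fields or whose entrada/salida index for dia_semana is out of Python's index range.
def Pre_obtener_personal_presente (personal : List (List String)) (dia_semana : Int) (hora_actual : String) : Prop :=
  ∀ persona ∈ personal, 3 ≤ persona.length ∧
    PySem.Raise.InRange persona.length (3 + (dia_semana - 1) * 2) ∧
    PySem.Raise.InRange persona.length (3 + (dia_semana - 1) * 2 + 1)
instance (personal : List (List String)) (dia_semana : Int) (hora_actual : String) : Decidable (Pre_obtener_personal_presente personal dia_semana hora_actual) := by unfold Pre_obtener_personal_presente; infer_instance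
def pvWitness_obtener_personal_presente : List (List String) × Int × String :=
  ([["Perez", "Ana", "Cajero", "08:00", "16:00"], ["Lu", "Bo", "Cajero", "DESCANSO", "DESCANSO"]], 1, "09:00")

def Spec_obtener_personal_presente (personal : List (List String)) (dia_semana : Int) (hora_actual : String) (out : List (String × List (List (String × String)))) : Prop := out = obtener_personal_presente_alt personal dia_semana hora_actual
instance (personal : List (List String)) (dia_semana : Int) (hora_actual : String) (out : List (String × List (List (String × String)))) : Decidable (Spec_obtener_personal_presente personal dia_semana hora_actual out) := by unfold Spec_obtener_personal_presente; infer_instance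

-- ===== CLAIM (what is proved, stated in full; the proofs are below) =====
def Claim_equal_obtener_personal_presente : Prop := ∀ (personal : List (List String)) (dia_semana : Int) (hora_actual : String), Dom_obtener_personal_presente personal dia_semana hora_actual → Pre_obtener_personal_presente personal dia_semana hora_actual → Spec_obtener_personal_presente personal dia_semana hora_actual (obtener_personal_presente personal dia_semana hora_actual)

-- ===== LEMMAS AND PROOFS =====

-- grouping of a flat (cargo, ficha) list: distinct cargos in first-occurrence order,
-- each paired with its fichas in list order
def pvGroup (ps : List (String × List (String × String))) : List (String × List (List (String × String))) :=
  (PySem.List.dedup (ps.map (·.1))).map (fun c => (c, (ps.filter (fun p => p.1 == c)).map (·.2)))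

theorem pvBodyA_eq_step (dia_semana : Int) (hora_actual : String)
    (d : PySem.Dict String (List (List (String × String)))) (persona : List String) :
    pvBodyA dia_semana hora_actual d persona =
      match pvPresente dia_semana hora_actual persona with
      | none => d
      | some (c, f) =>
          (if d.contains c then d else d.insert c []).insert c
            ((if d.contains c then d else d.insert c []).getD c [] ++ [f]) := by
  unfold pvBodyA pvPresente
  dsimp only
  split_ifs <;> simp_all

theorem pv_find?_beq_self {l : List String} {c : String} (h : c ∈ l) :
    l.find? (fun x => x == c) = some c := by
  induction l with
  | nil => simp at h
  | cons a l ih =>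
      by_cases hac : a = c
      · subst hac; simp [List.find?]
      · have hmem : c ∈ l := by
          rcases List.mem_cons.mp h with h1 | h1
          · exact absurd h1.symm hac
          · exact h1
        have hbe : (a == c) = false := by simp [hac]
        simp [List.find?, hbe, ih hmem]

theorem pv_get?_group (ps : List (String × List (String × String))) (c : String) :
    (PySem.Dict.mk (pvGroup ps)).get? c =
      if c ∈ ps.map (·.1) then some ((ps.filter (fun p => p.1 == c)).map (·.2)) else none := by
  unfold pvGroup PySem.Dict.get?
  rw [List.find?_map]
  by_cases h : c ∈ ps.map (·.1)
  · have hd : c ∈ PySem.List.dedup (ps.map (·.1)) := (PySem.List.mem_dedup _ _).mpr h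
    have hf : (PySem.List.dedup (ps.map (·.1))).find?
        ((fun p => p.1 == c) ∘ (fun c' => (c', (ps.filter (fun p => p.1 == c')).map (·.2)))) = some c :=
      pv_find?_beq_self hd
    rw [hf, if_pos h]
    rfl
  · have hd : c ∉ PySem.List.dedup (ps.map (·.1)) := fun hx => h ((PySem.List.mem_dedup _ _).mp hx)
    have hf : (PySem.List.dedup (ps.map (·.1))).find?
        ((fun p => p.1 == c) ∘ (fun c' => (c', (ps.filter (fun p => p.1 == c')).map (·.2)))) = none := by
      rw [List.find?_eq_none]
      intro x hx hbe
      exact hd (eq_of_beq hbe ▸ hx)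
    rw [hf, if_neg h]
    rfl

theorem pv_contains_group (ps : List (String × List (String × String))) (c : String) :
    (PySem.Dict.mk (pvGroup ps)).contains c = decide (c ∈ ps.map (·.1)) := by
  unfold pvGroup PySem.Dict.contains
  rw [List.any_map]
  by_cases h : c ∈ ps.map (·.1)
  · have hd : c ∈ PySem.List.dedup (ps.map (·.1)) := (PySem.List.mem_dedup _ _).mpr h
    rw [decide_eq_true h, List.any_eq_true]
    exact ⟨c, hd, by simp⟩
  · have hd : c ∉ PySem.List.dedup (ps.map (·.1)) := fun hx => h ((PySem.List.mem_dedup _ _).mp hx)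
    rw [decide_eq_false h, List.any_eq_false]
    intro x hx hbe
    exact hd (eq_of_beq hbe ▸ hx)

theorem pv_dedup_append (l : List String) (c : String) :
    PySem.List.dedup (l ++ [c]) =
      if c ∈ l then PySem.List.dedup l else PySem.List.dedup l ++ [c] := by
  have h1 : PySem.List.dedup (l ++ [c]) = PySem.Set.add (PySem.List.dedup l) c := by
    unfold PySem.List.dedup PySem.Set.ofList
    rw [List.foldl_append]
    rfl
  rw [h1]
  unfold PySem.Set.add PySem.Set.contains
  by_cases h : c ∈ l
  · have hc : List.contains (PySem.List.dedup l) c = true :=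
      List.contains_iff_mem.mpr ((PySem.List.mem_dedup _ _).mpr h)
    rw [if_pos hc, if_pos h]
  · have hc : ¬ List.contains (PySem.List.dedup l) c = true := by
      intro hx
      exact h ((PySem.List.mem_dedup _ _).mp (List.contains_iff_mem.mp hx))
    rw [if_neg hc, if_neg h]

theorem pv_filter_nil_of_not_mem (ps : List (String × List (String × String))) (c : String)
    (h : c ∉ ps.map (·.1)) : ps.filter (fun p => p.1 == c) = [] := by
  rw [List.filter_eq_nil_iff]
  intro p hp hbe
  exact h (by simpa [eq_of_beq hbe] using List.mem_map_of_mem (f := (·.1)) hp)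

theorem pv_filter_append_of_ne (ps : List (String × List (String × String)))
    (c c' : String) (f : List (String × String)) (hne : c' ≠ c) :
    (ps ++ [(c, f)]).filter (fun p => p.1 == c') = ps.filter (fun p => p.1 == c') := by
  rw [List.filter_append]
  have hbe : ((c : String) == c') = false := by simp [Ne.symm hne]
  have : ((c, f) :: []).filter (fun p => p.1 == c') = [] := by
    simp [List.filter, hbe]
  rw [this, List.append_nil]

theorem pv_step_group (ps : List (String × List (String × String)))
    (c : String) (f : List (String × String)) :
    ((if (PySem.Dict.mk (pvGroup ps)).contains c then PySem.Dict.mk (pvGroup ps)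
      else (PySem.Dict.mk (pvGroup ps)).insert c []).insert c
        ((if (PySem.Dict.mk (pvGroup ps)).contains c then PySem.Dict.mk (pvGroup ps)
          else (PySem.Dict.mk (pvGroup ps)).insert c []).getD c [] ++ [f])) =
      PySem.Dict.mk (pvGroup (ps ++ [(c, f)])) := by
  by_cases h : c ∈ ps.map (·.1)
  · -- existing key: the c-entry is extended in place, the others are untouched
    have hcont : (PySem.Dict.mk (pvGroup ps)).contains c = true := by
      rw [pv_contains_group, decide_eq_true h]
    rw [if_pos hcont]
    have hget : (PySem.Dict.mk (pvGroup ps)).getD c [] =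
        (ps.filter (fun p => p.1 == c)).map (·.2) := by
      unfold PySem.Dict.getD
      rw [pv_get?_group, if_pos h]
      rfl
    rw [hget]
    unfold PySem.Dict.insert
    rw [if_pos hcont]
    apply PySem.Dict.ext
    show (pvGroup ps).map _ = pvGroup (ps ++ [(c, f)])
    unfold pvGroup
    rw [List.map_append]
    simp only [List.map_cons, List.map_nil]
    rw [pv_dedup_append, if_pos h, List.map_map]
    apply List.map_congr_left
    intro c' _
    simp only [Function.comp]
    by_cases hcc : c' = c
    · subst hcc
      simp [List.filter_append]
    · have hbe : (c' == c) = false := by simp [hcc]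
      rw [pv_filter_append_of_ne ps c c' f hcc]
      simp [hbe]
  · -- new key: appended at the end, holding the singleton list
    have hcont : ¬ (PySem.Dict.mk (pvGroup ps)).contains c = true := by
      rw [pv_contains_group]
      simpa using h
    rw [if_neg hcont]
    have hins1 : (PySem.Dict.mk (pvGroup ps)).insert c [] =
        PySem.Dict.mk (pvGroup ps ++ [(c, [])]) := by
      unfold PySem.Dict.insert
      rw [if_neg hcont]
    rw [hins1]
    have hfnone : (pvGroup ps).find? (fun p => p.1 == c) = none := by
      unfold pvGroup
      rw [List.find?_map, List.find?_eq_none.mpr ?_]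
      · rfl
      · intro x hx hbe
        exact h ((PySem.List.mem_dedup _ _).mp (eq_of_beq hbe ▸ hx))
    have hget : (PySem.Dict.mk (pvGroup ps ++ [(c, [])])).getD c [] = ([] : List (List (String × String))) := by
      unfold PySem.Dict.getD PySem.Dict.get?
      show (Option.map _ (List.find? _ (pvGroup ps ++ [(c, [])]))).getD [] = _
      rw [List.find?_append, hfnone]
      simp [List.find?]
    rw [hget]
    have hcont2 : (PySem.Dict.mk (pvGroup ps ++ [(c, [])])).contains c = true := by
      unfold PySem.Dict.contains
      show (pvGroup ps ++ [(c, [])]).any _ = true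
      rw [List.any_eq_true]
      exact ⟨(c, []), by simp⟩
    unfold PySem.Dict.insert
    rw [if_pos hcont2]
    apply PySem.Dict.ext
    show (pvGroup ps ++ [(c, [])]).map _ = pvGroup (ps ++ [(c, f)])
    unfold pvGroup
    rw [List.map_append]
    have hsing : List.map (fun p => if (p.1 == c) = true then ((c : String), ([] : List (List (String × String))) ++ [f]) else p) [(c, [])]
        = [((c : String), [f])] := by simp
    rw [hsing]
    conv_rhs => rw [List.map_append]
    simp only [List.map_cons, List.map_nil]
    rw [pv_dedup_append, if_neg h, List.map_append, List.map_map]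
    congr 1
    · apply List.map_congr_left
      intro c' hc'
      have hc'mem : c' ∈ ps.map (·.1) := (PySem.List.mem_dedup _ _).mp hc'
      have hcc : c' ≠ c := fun hcc => h (hcc ▸ hc'mem)
      have hbe : (c' == c) = false := by simp [hcc]
      simp only [Function.comp, hbe, if_neg, Bool.false_eq_true, not_false_eq_true]
      rw [pv_filter_append_of_ne ps c c' f hcc]
    · have hfil : ps.filter (fun p => p.1 == c) = [] := pv_filter_nil_of_not_mem ps c h
      simp [List.filter_append, hfil]

theorem pv_foldl_group (dia_semana : Int) (hora_actual : String) :
    ∀ (rest : List (List String)) (ps : List (String × List (String × String))),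
      rest.foldl (pvBodyA dia_semana hora_actual) (PySem.Dict.mk (pvGroup ps)) =
        PySem.Dict.mk (pvGroup (ps ++ rest.filterMap (pvPresente dia_semana hora_actual))) := by
  intro rest
  induction rest with
  | nil => intro ps; simp
  | cons p rest ih =>
      intro ps
      rw [List.foldl_cons]
      cases hsel : pvPresente dia_semana hora_actual p with
      | none =>
          rw [pvBodyA_eq_step, hsel]
          simpa [List.filterMap_cons, hsel] using ih ps
      | some cf =>
          obtain ⟨c, f⟩ := cf
          rw [pvBodyA_eq_step, hsel]
          show List.foldl _ ((if (PySem.Dict.mk (pvGroup ps)).contains c then PySem.Dict.mk (pvGroup ps)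
              else (PySem.Dict.mk (pvGroup ps)).insert c []).insert c
                ((if (PySem.Dict.mk (pvGroup ps)).contains c then PySem.Dict.mk (pvGroup ps)
                  else (PySem.Dict.mk (pvGroup ps)).insert c []).getD c [] ++ [f])) rest = _
          rw [pv_step_group ps c f, ih (ps ++ [(c, f)])]
          simp [hsel]

-- unfolding equation for PySem.List.insertBy on a cons cell
theorem pv_insertBy_cons {α : Type} (before : α → α → Bool) (x y : α) (ys : List α) :
    PySem.List.insertBy before x (y :: ys) =
      if before x y then x :: y :: ys else y :: PySem.List.insertBy before x ys := rfl

-- a stable-sort step: insertBy commutes with map along a key-respecting projection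
theorem pv_map_insertBy {α β : Type} (g : α → β) (key : β → String) (x : α) :
    ∀ l : List α,
      (PySem.List.insertBy (fun a b => decide (key (g a) < key (g b))) x l).map g =
        PySem.List.insertBy (fun a b => decide (key a < key b)) (g x) (l.map g) := by
  intro l
  induction l with
  | nil => rfl
  | cons y ys ih =>
      rw [List.map_cons]
      simp only [pv_insertBy_cons]
      by_cases hb : decide (key (g x) < key (g y)) = true
      · rw [if_pos hb, if_pos hb, List.map_cons, List.map_cons]
      · rw [if_neg hb, if_neg hb, List.map_cons, ih]

theorem pv_map_sorted {α β : Type} (g : α → β) (key : β → String) (l : List α) :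
    (PySem.List.sorted l (fun a => key (g a)) false).map g =
      PySem.List.sorted (l.map g) key false := by
  induction l using List.reverseRecOn with
  | nil => rfl
  | append_singleton l x ih =>
      unfold PySem.List.sorted at *
      simp only [if_neg (by simp : ¬ (false = true))] at *
      rw [List.foldl_append, List.map_append, List.foldl_append]
      simp only [List.foldl_cons, List.foldl_nil, List.map_cons, List.map_nil]
      rw [pv_map_insertBy, ih]

theorem pv_insertBy_head {α : Type} (key : α → String) (x : α) (l : List α)
    (h : ∀ y ∈ l, key x < key y) :
    PySem.List.insertBy (fun a b => decide (key a < key b)) x l = x :: l := by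
  cases l with
  | nil => rfl
  | cons z zs =>
      rw [pv_insertBy_cons]
      rw [if_pos (by simpa using decide_eq_true (h z (by simp)))]

theorem pv_filter_insertBy {α : Type} (key : α → String) (q : α → Bool) (x : α) :
    ∀ ys : List α, ys.Pairwise (fun a b => key a ≤ key b) →
      (PySem.List.insertBy (fun a b => decide (key a < key b)) x ys).filter q =
        if q x then PySem.List.insertBy (fun a b => decide (key a < key b)) x (ys.filter q)
        else ys.filter q := by
  intro ys
  induction ys with
  | nil =>
      intro _
      show List.filter q [x] = if q x = true then PySem.List.insertBy (fun a b => decide (key a < key b)) x [] else []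
      by_cases hq : q x = true
      · rw [if_pos hq, List.filter_cons_of_pos hq, List.filter_nil]; rfl
      · rw [if_neg hq, List.filter_cons_of_neg hq, List.filter_nil]
  | cons y ys ih =>
      intro hs
      rw [List.pairwise_cons] at hs
      obtain ⟨hy, hs'⟩ := hs
      rw [pv_insertBy_cons]
      by_cases hb : decide (key x < key y) = true
      · have hlt : key x < key y := of_decide_eq_true hb
        rw [if_pos hb]
        by_cases hq : q x = true
        · rw [if_pos hq, List.filter_cons_of_pos hq]
          by_cases hqy : q y = true
          · rw [List.filter_cons_of_pos hqy, pv_insertBy_cons, if_pos hb]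
          · rw [List.filter_cons_of_neg hqy]
            rw [pv_insertBy_head key x (ys.filter q) ?_]
            intro z hz
            exact lt_of_lt_of_le hlt (hy z (List.mem_of_mem_filter hz))
        · rw [if_neg hq, List.filter_cons_of_neg hq]
      · rw [if_neg hb]
        by_cases hqy : q y = true
        · rw [List.filter_cons_of_pos hqy]
          rw [List.filter_cons_of_pos hqy]
          rw [ih hs', pv_insertBy_cons, if_neg hb]
          by_cases hq : q x = true
          · rw [if_pos hq, if_pos hq]
          · rw [if_neg hq, if_neg hq]
        · rw [List.filter_cons_of_neg hqy]
          rw [List.filter_cons_of_neg hqy]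
          rw [ih hs']

theorem pv_filter_sorted {α : Type} (key : α → String) (q : α → Bool) (l : List α) :
    (PySem.List.sorted l key false).filter q = PySem.List.sorted (l.filter q) key false := by
  induction l using List.reverseRecOn with
  | nil => rfl
  | append_singleton l x ih =>
      unfold PySem.List.sorted at *
      simp only [if_neg (by simp : ¬ (false = true))] at *
      rw [List.foldl_append, List.filter_append, List.foldl_append]
      simp only [List.foldl_cons, List.foldl_nil]
      rw [pv_filter_insertBy key q x _ ?sorted]
      case sorted =>
        have := PySem.List.sorted_pairwise l key
        unfold PySem.List.sorted at this
        simpa using this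
      by_cases hq : q x = true
      · rw [if_pos hq, List.filter_cons_of_pos hq, List.filter_nil, ih]
        simp only [List.foldl_cons, List.foldl_nil]
      · rw [if_neg hq, List.filter_cons_of_neg hq, List.filter_nil, ih]
        simp only [List.foldl_nil]

-- ===== VERDICT (by name: the statement is the Claim_ definition above) =====
theorem obtener_personal_presente_spec : Claim_equal_obtener_personal_presente := by
  unfold Claim_equal_obtener_personal_presente
  intro personal dia_semana hora_actual _ _
  unfold Spec_obtener_personal_presente
  unfold obtener_personal_presente obtener_personal_presente_alt
  have hfold := pv_foldl_group dia_semana hora_actual personal []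
  simp only [List.nil_append] at hfold
  have hempty : (PySem.Dict.empty : PySem.Dict String (List (List (String × String)))) =
      PySem.Dict.mk (pvGroup []) := by rfl
  rw [hempty, hfold]
  unfold pvGroup
  rw [List.map_map]
  apply List.map_congr_left
  intro c _
  simp only [Function.comp]
  rw [pv_filter_sorted (fun p => pvSalida p.2) (fun p => p.1 == c)
        (personal.filterMap (pvPresente dia_semana hora_actual))]
  rw [← pv_map_sorted (fun p : String × List (String × String) => p.2) pvSalida
        ((personal.filterMap (pvPresente dia_semana hora_actual)).filter (fun p => p.1 == c))]
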